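-- pv_equiv track=rewrite | github.com/EduAnacleto/SortAlgorithms | sort.py | ordenada
-- ===== SOURCE A (Python) =====
-- def ordenada(lista):
--     order = 0
--     for i in range(1,len(lista)):
--         if lista[i-1] < lista[i]:
--             if order == 1 or order == 0:
--                 order = 1
--             else:
--                 return -1
--         elif lista[i-1] > lista[i]:
--             if order == 2 or order == 0:
--                 order = 2
--             else:
--                 return -1
--
--     return order
-- ===== SOURCE B (Python) =====
-- def ordenada(lista):
--     pairs = list(zip(lista, lista[1:]))
--     has_asc = any(a < b for a, b in pairs)
--     has_desc = any(a > b for a, b in pairs)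
--     if has_asc and has_desc:
--         return -1
--     if has_asc:
--         return 1
--     if has_desc:
--         return 2
--     return 0
-- ===== Notes on version B (the rewrite author's own statement) =====
-- stated objective: simpler
-- what changed: Replaces A's fused early-exit state machine over indices with two independent strict-comparison flags over adjacent pairs plus a four-way decision table.
import Mathlib
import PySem

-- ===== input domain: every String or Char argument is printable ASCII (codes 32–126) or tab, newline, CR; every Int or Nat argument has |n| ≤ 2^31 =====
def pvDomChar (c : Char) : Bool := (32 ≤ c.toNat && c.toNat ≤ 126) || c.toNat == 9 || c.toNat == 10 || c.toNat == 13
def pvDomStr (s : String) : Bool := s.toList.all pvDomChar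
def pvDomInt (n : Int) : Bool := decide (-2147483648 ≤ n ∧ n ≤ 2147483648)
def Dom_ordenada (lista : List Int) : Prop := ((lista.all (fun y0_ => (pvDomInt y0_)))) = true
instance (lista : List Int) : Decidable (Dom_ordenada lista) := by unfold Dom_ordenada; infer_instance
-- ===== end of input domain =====

-- B replaces A's fused early-exit state machine over indices by two independent
-- strict-comparison flags over adjacent pairs plus a small decision table (simpler).

-- ===== PORT A =====
-- A's loop over range(1, len(lista)) with early 'return -1' is a foldl whose state is
-- Sum Int Int: .inl r = the function already returned r, .inr order = the running 'order'.
-- Indices i and i-1 are always in range, so pyGetD's default 0 is never read.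
def ordenadaStep (st : Sum Int Int) (a b : Int) : Sum Int Int :=
  match st with
  | .inl r => .inl r
  | .inr order =>
    if a < b then
      (if order = 1 ∨ order = 0 then .inr 1 else .inl (-1))
    else if a > b then
      (if order = 2 ∨ order = 0 then .inr 2 else .inl (-1))
    else .inr order

def ordenada (lista : List Int) : Int :=
  match (PySem.List.pyRange 1 (PySem.List.len lista) 1).foldl
      (fun st i => ordenadaStep st (PySem.List.pyGetD lista (i - 1) 0) (PySem.List.pyGetD lista i 0))
      (.inr 0) with
  | .inl r => r
  | .inr order => order

-- ===== PORT B =====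
def ordenada_alt (lista : List Int) : Int :=
  let pairs := lista.zip (PySem.List.slice lista (some 1) none)   -- zip(lista, lista[1:])
  let has_asc := pairs.any (fun p => p.1 < p.2)
  let has_desc := pairs.any (fun p => p.1 > p.2)
  if has_asc && has_desc then -1
  else if has_asc then 1
  else if has_desc then 2
  else 0

-- ===== PRECONDITION & SPEC =====
def Spec_ordenada (lista : List Int) (out : Int) : Prop := out = ordenada_alt lista
instance (lista : List Int) (out : Int) : Decidable (Spec_ordenada lista out) := by unfold Spec_ordenada; infer_instance

-- ===== CLAIM (what is proved, stated in full; the proofs are below) =====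
def Claim_equal_ordenada : Prop := ∀ (lista : List Int), Dom_ordenada lista → Spec_ordenada lista (ordenada lista)

-- ===== LEMMAS AND PROOFS =====

-- encode the two flags as A's loop state
def ordenadaEnc (a d : Bool) : Sum Int Int :=
  if a && d then .inl (-1) else .inr (if a then 1 else if d then 2 else 0)

-- one step of A's machine updates the encoded flags
lemma ordenadaStep_enc (a d : Bool) (x y : Int) :
    ordenadaStep (ordenadaEnc a d) x y = ordenadaEnc (a || decide (x < y)) (d || decide (x > y)) := by
  rcases lt_trichotomy x y with h | h | h
  · cases a <;> cases d <;> simp [ordenadaStep, ordenadaEnc, h, asymm h]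
  · subst h
    cases a <;> cases d <;> simp [ordenadaStep, ordenadaEnc]
  · cases a <;> cases d <;> simp [ordenadaStep, ordenadaEnc, h, asymm h]

-- A's fold over pairs computes the encoded flags
lemma ordenada_fold_enc (ps : List (Int × Int)) : ∀ (a d : Bool),
    ps.foldl (fun st p => ordenadaStep st p.1 p.2) (ordenadaEnc a d)
      = ordenadaEnc (a || ps.any (fun p => p.1 < p.2)) (d || ps.any (fun p => p.1 > p.2)) := by
  induction ps with
  | nil => simp
  | cons p t ih =>
    intro a d
    simp only [List.foldl_cons, ordenadaStep_enc, ih, List.any_cons]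
    congr 1 <;> simp [Bool.or_assoc]

-- A's index fold equals the fold over adjacent pairs
lemma ordenada_idx_fold (l : List Int) : ∀ (st : Sum Int Int),
    (List.range (l.length - 1)).foldl
        (fun st k => ordenadaStep st (l.getD k 0) (l.getD (k + 1) 0)) st
      = (l.zip l.tail).foldl (fun st p => ordenadaStep st p.1 p.2) st := by
  induction l with
  | nil => simp
  | cons x t ih =>
    intro st
    cases t with
    | nil => simp
    | cons y u =>
      simp only [List.length_cons, Nat.add_sub_cancel, List.range_succ_eq_map,
        List.foldl_cons, List.foldl_map, List.getD_cons_zero, List.getD_cons_succ,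
        List.zip_cons_cons, List.tail_cons]
      exact ih _

-- bridge: A's pyRange/pyGetD fold is the Nat-range fold of ordenada_idx_fold
lemma ordenada_pyfold (l : List Int) (st : Sum Int Int) :
    (PySem.List.pyRange 1 (PySem.List.len l) 1).foldl
        (fun st i => ordenadaStep st (PySem.List.pyGetD l (i - 1) 0) (PySem.List.pyGetD l i 0)) st
      = (List.range (l.length - 1)).foldl
        (fun st k => ordenadaStep st (l.getD k 0) (l.getD (k + 1) 0)) st := by
  rw [PySem.List.pyRange_one]
  simp only [PySem.List.len_eq, List.foldl_map]
  have hn : ((l.length : Int) - 1).toNat = l.length - 1 := by omega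
  rw [hn]
  apply PySem.List.foldl_congr_mem
  intro st k hk
  have h1 : (1 : Int) + (k : Int) - 1 = (k : Int) := by ring
  have h2 : (1 : Int) + (k : Int) = ((k + 1 : Nat) : Int) := by push_cast; ring
  rw [h1, h2, PySem.List.pyGetD_natCast, PySem.List.pyGetD_natCast]

theorem ordenada_spec : Claim_equal_ordenada := by
  intro lista _
  unfold Spec_ordenada ordenada ordenada_alt
  rw [PySem.List.slice_from_one, ordenada_pyfold, ordenada_idx_fold]
  have h0 : (Sum.inr 0 : Sum Int Int) = ordenadaEnc false false := rfl
  rw [h0, ordenada_fold_enc]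
  simp only [Bool.false_or, ordenadaEnc]
  split_ifs with h1 h2 h3 <;> simp_all
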